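-- pv_equiv track=rewrite | github.com/W-h-o-v-i-a-n/Teor_ver | lab1/startstopnyy_gen_functions.py | complexity_test_nonlinear
-- ===== SOURCE A (Python) =====
-- def complexity_test_nonlinear(sequence: str):
--     """Нелінійний тест на складність."""
--
--     window_size = 1  # nonlinear complexity
--     flag = True
--     while flag:
--         flag = False
--         windows = {}
--         for i in range(len(sequence) - window_size):
--             window = sequence[i:i + window_size]
--             if window not in windows.keys():
--                 windows.setdefault(window, sequence[i + window_size])
--             else:
--                 if windows[window] != sequence[i + window_size]:
--                     window_size += 1
--                     flag = True
--                     break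
--
--     return 'Кількість бітів, від яких залежить наступний біт ---> {}\n\n'.format(window_size)
-- ===== SOURCE B (Python) =====
-- def deterministic(sequence, w):
--     """True iff every length-w context determines the following character."""
--     seen = {}
--     for i in range(len(sequence) - w):
--         window = sequence[i:i + w]
--         nxt = sequence[i + w]
--         if seen.setdefault(window, nxt) != nxt:
--             return False
--     return True
--
--
-- def complexity_test_nonlinear(sequence: str):
--     # Determinism is monotone in the window size: gallop to a deterministic
--     # size, then binary-search the least one inside the bracket.
--     n = len(sequence)
--     top = max(1, n - 1)          # a single window is always deterministic
--     lo, hi = 1, 1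
--     while hi < top and not deterministic(sequence, hi):
--         lo = hi + 1
--         hi = min(hi * 2 + 1, top)
--     while lo < hi:
--         mid = (lo + hi) // 2
--         if deterministic(sequence, mid):
--             hi = mid
--         else:
--             lo = mid + 1
--     return 'Кількість бітів, від яких залежить наступний біт ---> {}\n\n'.format(lo)
-- ===== Notes on version B (the rewrite author's own statement) =====
-- stated objective: faster
-- what changed: A restarts its full dict scan from window size 1,2,3,... until one size is conflict-free; B exploits that determinism is monotone in the window size and finds the least deterministic size by exponential (galloping) search plus binary search over that predicate.
import Mathlib
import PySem

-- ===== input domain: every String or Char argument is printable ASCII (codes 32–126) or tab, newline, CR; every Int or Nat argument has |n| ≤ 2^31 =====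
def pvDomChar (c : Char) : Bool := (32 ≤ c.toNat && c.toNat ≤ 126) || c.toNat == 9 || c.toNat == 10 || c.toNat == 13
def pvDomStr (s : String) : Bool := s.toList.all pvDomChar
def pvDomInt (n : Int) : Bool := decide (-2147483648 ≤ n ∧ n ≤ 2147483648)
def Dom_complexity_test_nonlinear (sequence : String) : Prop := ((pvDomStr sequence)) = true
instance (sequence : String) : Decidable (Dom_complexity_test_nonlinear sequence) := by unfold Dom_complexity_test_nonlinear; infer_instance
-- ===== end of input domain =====

-- B replaces A's restart-from-scratch size increments by a gallop-then-binary search over the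
-- monotone determinism predicate; equal return value proved on all inputs (A is total).

-- ===== PORT A =====
-- inner 'for i in range(len(sequence) - window_size)' loop; returns the 'flag' set by the break.
-- range(len - w) over the Nat subtraction is exact: Python's range of a negative stop is empty.
-- sequence[i:i+w] = (cs.drop i).take w (nonneg in-range slice, cf. PySem.List.slice_natCast_add);
-- sequence[i+w] = cs.getD (i+w) ' ' (i + w < cs.length for every generated index, so exact).
def aGo (cs : List Char) (w : Nat) (d : PySem.Dict (List Char) Char) : List Nat → Bool
  | [] => false
  | i :: rest =>
    let window := (cs.drop i).take w
    if d.contains window = false then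
      aGo cs w (d.setdefault window (cs.getD (i + w) ' ')) rest
    else
      if d.getD window ' ' ≠ cs.getD (i + w) ' ' then true
      else aGo cs w d rest

-- termination facts for the loops (named, with proof terms kept small)
lemma pvDecA (n w : Nat) (h : w < n) : n - (w + 1) < n - w :=
  Nat.sub_succ_lt_self n w h

lemma pvMidLo (lo hi : Nat) (h : lo < hi) : lo ≤ (lo + hi) / 2 :=
  le_trans (Nat.le_of_eq ((Nat.mul_two lo) ▸ (Nat.mul_div_cancel lo (by decide : 0 < 2))).symm)
    (Nat.div_le_div_right (Nat.add_le_add_left (Nat.le_of_lt h) lo))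

lemma pvMidHi (lo hi : Nat) (h : lo < hi) : (lo + hi) / 2 < hi :=
  (Nat.div_lt_iff_lt_mul (by decide : 0 < 2)).mpr
    ((Nat.mul_two hi).symm ▸ Nat.add_lt_add_right h hi)

lemma pvDecGallop (top hi : Nat) (h : hi < top) : top - min (hi * 2 + 1) top < top - hi :=
  Nat.sub_lt_sub_left h
    (lt_min (Nat.lt_succ_of_le (Nat.le_mul_of_pos_right hi (by decide : 0 < 2))) h)

lemma pvDecSearchL (lo hi : Nat) (h : lo < hi) : (lo + hi) / 2 - lo < hi - lo :=
  Nat.sub_lt_sub_right (pvMidLo lo hi h) (pvMidHi lo hi h)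

lemma pvDecSearchR (lo hi : Nat) (h : lo < hi) : hi - ((lo + hi) / 2 + 1) < hi - lo :=
  Nat.sub_lt_sub_left h (Nat.lt_succ_of_le (pvMidLo lo hi h))

-- a conflict needs at least one window, so w < |cs|
lemma aGo_range_true_imp (cs : List Char) (w : Nat) (d : PySem.Dict (List Char) Char)
    (h : aGo cs w d (List.range (cs.length - w)) = true) : w < cs.length := by
  by_contra hc
  rw [Nat.sub_eq_zero_of_le (Nat.le_of_not_lt hc), List.range_zero] at h
  exact Bool.noConfusion h

-- 'while flag:' — each failed pass restarts with window_size + 1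
def aLoop (cs : List Char) (w : Nat) : Nat :=
  if h : aGo cs w PySem.Dict.empty (List.range (cs.length - w)) = true then
    aLoop cs (w + 1)
  else w
termination_by cs.length - w
decreasing_by exact pvDecA cs.length w (aGo_range_true_imp cs w PySem.Dict.empty h)

def complexity_test_nonlinear (sequence : String) : String :=
  "Кількість бітів, від яких залежить наступний біт ---> "
    ++ PySem.Int.toStr ((aLoop sequence.toList 1 : Nat) : Int) ++ "\n\n"

-- ===== PORT B =====
-- Source B's 'deterministic(sequence, w)': setdefault then compare, early return False
def bGo (cs : List Char) (w : Nat) : List Nat → PySem.Dict (List Char) Char → Bool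
  | [], _ => true
  | i :: rest, seen =>
    let window := (cs.drop i).take w
    let nxt := cs.getD (i + w) ' '
    let seen' := seen.setdefault window nxt
    if seen'.getD window ' ' ≠ nxt then false   -- seen.setdefault(window, nxt) != nxt
    else bGo cs w rest seen'

def bDet (cs : List Char) (w : Nat) : Bool :=
  bGo cs w (List.range (cs.length - w)) PySem.Dict.empty

-- 'while hi < top and not deterministic(...)': gallop the bracket [lo, hi]
def bGallop (cs : List Char) (top lo hi : Nat) : Nat × Nat :=
  if h : hi < top ∧ bDet cs hi = false then
    bGallop cs top (hi + 1) (min (hi * 2 + 1) top)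
  else (lo, hi)
termination_by top - hi
decreasing_by exact pvDecGallop top hi h.1

-- 'while lo < hi:' — binary search ((lo + hi) // 2 on nonneg ints = Nat division, exact)
def bSearch (cs : List Char) (lo hi : Nat) : Nat :=
  if _h : lo < hi then
    let mid := (lo + hi) / 2
    if bDet cs mid then bSearch cs lo mid
    else bSearch cs (mid + 1) hi
  else lo
termination_by hi - lo
decreasing_by
  · exact pvDecSearchL lo hi _h
  · exact pvDecSearchR lo hi _h

def complexity_test_nonlinear_alt (sequence : String) : String :=
  let cs := sequence.toList
  let top := max 1 (cs.length - 1)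
  let p := bGallop cs top 1 1
  "Кількість бітів, від яких залежить наступний біт ---> "
    ++ PySem.Int.toStr ((bSearch cs p.1 p.2 : Nat) : Int) ++ "\n\n"

-- ===== PRECONDITION & SPEC =====
def Spec_complexity_test_nonlinear (sequence : String) (out : String) : Prop := out = complexity_test_nonlinear_alt sequence
instance (sequence : String) (out : String) : Decidable (Spec_complexity_test_nonlinear sequence out) := by unfold Spec_complexity_test_nonlinear; infer_instance

-- ===== CLAIM (what is proved, stated in full; the proofs are below) =====
def Claim_equal_complexity_test_nonlinear : Prop := ∀ (sequence : String), Dom_complexity_test_nonlinear sequence → Spec_complexity_test_nonlinear sequence (complexity_test_nonlinear sequence)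

-- ===== LEMMAS AND PROOFS =====

-- "every length-w context determines the next character"
def pvDet (cs : List Char) (w : Nat) : Prop :=
  ∀ i j : Nat, i < cs.length - w → j < cs.length - w →
    (cs.drop i).take w = (cs.drop j).take w → cs.getD (i + w) ' ' = cs.getD (j + w) ' '

-- A's inner pass returns no conflict iff the remaining indices agree with the dict and pairwise
lemma aGo_eq_false_iff (cs : List Char) (w : Nat) :
    ∀ (l : List Nat) (d : PySem.Dict (List Char) Char), d.keys.Nodup →
    (aGo cs w d l = false ↔
      ((∀ i ∈ l, ∀ c, d.get? ((cs.drop i).take w) = some c → cs.getD (i + w) ' ' = c) ∧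
       (∀ i ∈ l, ∀ j ∈ l, (cs.drop i).take w = (cs.drop j).take w →
          cs.getD (i + w) ' ' = cs.getD (j + w) ' '))) := by
  intro l
  induction l with
  | nil => intro d hnd; simp [aGo]
  | cons i rest ih =>
    intro d hnd
    cases hg : d.get? ((cs.drop i).take w) with
    | none =>
      have hc : d.contains ((cs.drop i).take w) = false := by
        rw [PySem.Dict.contains_eq_isSome_get?, hg]; rfl
      have hsd := PySem.Dict.setdefault_of_not_contains (k := (cs.drop i).take w)
        (v := cs.getD (i + w) ' ') (d := d) hc
      have hstep : aGo cs w d (i :: rest)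
          = aGo cs w (d.insert ((cs.drop i).take w) (cs.getD (i + w) ' ')) rest := by
        simp only [aGo, hc]
        rw [if_pos trivial, hsd]
      rw [hstep, ih _ (PySem.Dict.nodup_keys_insert _ _ _ hnd)]
      constructor
      · rintro ⟨H1, H2⟩
        refine ⟨?_, ?_⟩
        · intro i' hi' c hgc
          rcases List.mem_cons.mp hi' with hie | hi'
          · rw [hie, hg] at hgc; cases hgc
          · by_cases he : (cs.drop i').take w = (cs.drop i).take w
            · rw [he, hg] at hgc; cases hgc
            · refine H1 i' hi' c ?_
              rw [PySem.Dict.get?_insert_of_ne _ _ he]; exact hgc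
        · intro i' hi' j' hj' he
          have key : ∀ a ∈ rest, (cs.drop a).take w = (cs.drop i).take w →
              cs.getD (a + w) ' ' = cs.getD (i + w) ' ' := fun a ha hae =>
            H1 a ha _ (by rw [hae, PySem.Dict.get?_insert_self])
          rcases List.mem_cons.mp hi' with hie | hi' <;> rcases List.mem_cons.mp hj' with hje | hj'
          · rw [hie, hje]
          · rw [hie]
            exact (key j' hj' (by rw [← he, hie])).symm
          · rw [hje]
            exact key i' hi' (by rw [he, hje])
          · exact H2 i' hi' j' hj' he
      · rintro ⟨G1, G2⟩
        refine ⟨?_, ?_⟩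
        · intro i' hi' c hgc
          by_cases he : (cs.drop i').take w = (cs.drop i).take w
          · rw [he, PySem.Dict.get?_insert_self] at hgc
            cases hgc
            exact G2 i' (List.mem_cons_of_mem _ hi') i List.mem_cons_self he
          · rw [PySem.Dict.get?_insert_of_ne _ _ he] at hgc
            exact G1 i' (List.mem_cons_of_mem _ hi') c hgc
        · intro i' hi' j' hj' he
          exact G2 i' (List.mem_cons_of_mem _ hi') j' (List.mem_cons_of_mem _ hj') he
    | some v =>
      have hc : d.contains ((cs.drop i).take w) = true := by
        rw [PySem.Dict.contains_eq_isSome_get?, hg]; rfl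
      have hgd : d.getD ((cs.drop i).take w) ' ' = v :=
        PySem.Dict.getD_of_get?_eq_some _ _ hg
      by_cases hv : v = cs.getD (i + w) ' '
      · have hstep : aGo cs w d (i :: rest) = aGo cs w d rest := by
          simp only [aGo]
          rw [if_neg (by simp [hc]), if_neg (by rw [hgd, ← hv]; simp)]
        rw [hstep, ih _ hnd]
        constructor
        · rintro ⟨H1, H2⟩
          refine ⟨?_, ?_⟩
          · intro i' hi' c hgc
            rcases List.mem_cons.mp hi' with hie | hi'
            · rw [hie, hg] at hgc
              cases hgc
              rw [hie]
              exact hv.symm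
            · exact H1 i' hi' c hgc
          · intro i' hi' j' hj' he
            have key : ∀ a ∈ rest, (cs.drop a).take w = (cs.drop i).take w →
                cs.getD (a + w) ' ' = v := fun a ha hae =>
              H1 a ha v (by rw [hae]; exact hg)
            rcases List.mem_cons.mp hi' with hie | hi' <;> rcases List.mem_cons.mp hj' with hje | hj'
            · rw [hie, hje]
            · rw [hie]
              exact ((key j' hj' (by rw [← he, hie])).trans hv).symm
            · rw [hje]
              exact (key i' hi' (by rw [he, hje])).trans hv
            · exact H2 i' hi' j' hj' he
        · rintro ⟨G1, G2⟩
          exact ⟨fun i' hi' c hgc => G1 i' (List.mem_cons_of_mem _ hi') c hgc,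
                 fun i' hi' j' hj' he => G2 i' (List.mem_cons_of_mem _ hi') j' (List.mem_cons_of_mem _ hj') he⟩
      · have hstep : aGo cs w d (i :: rest) = true := by
          simp only [aGo]
          rw [if_neg (by simp [hc]), if_pos (by rw [hgd]; exact hv)]
        rw [hstep]
        constructor
        · intro h; cases h
        · rintro ⟨G1, _⟩
          exact absurd ((G1 i List.mem_cons_self v hg).symm) hv

lemma aCheck_false_iff (cs : List Char) (w : Nat) :
    (aGo cs w PySem.Dict.empty (List.range (cs.length - w)) = false) ↔ pvDet cs w := by
  rw [aGo_eq_false_iff cs w _ _ PySem.Dict.nodup_keys_empty]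
  constructor
  · rintro ⟨_, H⟩ i j hi hj
    exact H i (List.mem_range.mpr hi) j (List.mem_range.mpr hj)
  · intro h
    refine ⟨?_, ?_⟩
    · intro i _ c hgc
      rw [PySem.Dict.get?_empty] at hgc
      cases hgc
    · exact fun i hi j hj => h i j (List.mem_range.mp hi) (List.mem_range.mp hj)

-- B's check is pointwise the negation of A's inner pass
lemma bGo_eq_not_aGo (cs : List Char) (w : Nat) :
    ∀ (l : List Nat) (d : PySem.Dict (List Char) Char),
      bGo cs w l d = ! aGo cs w d l := by
  intro l
  induction l with
  | nil => intro d; simp [aGo, bGo]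
  | cons i rest ih =>
    intro d
    cases hg : d.get? ((cs.drop i).take w) with
    | none =>
      have hc : d.contains ((cs.drop i).take w) = false := by
        rw [PySem.Dict.contains_eq_isSome_get?, hg]; rfl
      have hsd := PySem.Dict.setdefault_of_not_contains (k := (cs.drop i).take w)
        (v := cs.getD (i + w) ' ') (d := d) hc
      have hval : (d.setdefault ((cs.drop i).take w) (cs.getD (i + w) ' ')).getD
          ((cs.drop i).take w) ' ' = cs.getD (i + w) ' ' := by
        rw [hsd, PySem.Dict.getD_insert_self]
      have hb : bGo cs w (i :: rest) d
          = bGo cs w rest (d.setdefault ((cs.drop i).take w) (cs.getD (i + w) ' ')) := by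
        simp only [bGo]
        rw [if_neg (by rw [hval]; simp)]
      have ha : aGo cs w d (i :: rest)
          = aGo cs w (d.setdefault ((cs.drop i).take w) (cs.getD (i + w) ' ')) rest := by
        simp only [aGo]
        rw [if_pos (by simp [hc])]
      rw [hb, ha, ih]
    | some v =>
      have hc : d.contains ((cs.drop i).take w) = true := by
        rw [PySem.Dict.contains_eq_isSome_get?, hg]; rfl
      have hsd := PySem.Dict.setdefault_of_contains (k := (cs.drop i).take w)
        (v := cs.getD (i + w) ' ') (d := d) hc
      have hgd : d.getD ((cs.drop i).take w) ' ' = v :=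
        PySem.Dict.getD_of_get?_eq_some _ _ hg
      have hval : (d.setdefault ((cs.drop i).take w) (cs.getD (i + w) ' ')).getD
          ((cs.drop i).take w) ' ' = v := by
        rw [hsd, hgd]
      by_cases hv : v = cs.getD (i + w) ' '
      · have hb : bGo cs w (i :: rest) d = bGo cs w rest d := by
          simp only [bGo]
          rw [if_neg (by rw [hval, ← hv]; simp), hsd]
        have ha : aGo cs w d (i :: rest) = aGo cs w d rest := by
          simp only [aGo]
          rw [if_neg (by simp [hc]), if_neg (by rw [hgd, ← hv]; simp)]
        rw [hb, ha, ih]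
      · have hb : bGo cs w (i :: rest) d = false := by
          simp only [bGo]
          rw [if_pos (by rw [hval]; exact hv)]
        have ha : aGo cs w d (i :: rest) = true := by
          simp only [aGo]
          rw [if_neg (by simp [hc]), if_pos (by rw [hgd]; exact hv)]
        rw [hb, ha]
        rfl

lemma bDet_true_iff (cs : List Char) (w : Nat) : bDet cs w = true ↔ pvDet cs w := by
  rw [bDet, bGo_eq_not_aGo, Bool.not_eq_eq_eq_not, Bool.not_true, aCheck_false_iff]

-- determinism is monotone in the window size
lemma pvDet_succ (cs : List Char) (w : Nat) (h : pvDet cs w) : pvDet cs (w + 1) := by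
  intro i j hi hj heq
  have hil : i < cs.length := by omega
  have hjl : j < cs.length := by omega
  rw [← List.getElem_cons_drop hil, ← List.getElem_cons_drop hjl, List.take_succ_cons,
    List.take_succ_cons] at heq
  have h2 : (cs.drop (i + 1)).take w = (cs.drop (j + 1)).take w := (List.cons_eq_cons.mp heq).2
  have := h (i + 1) (j + 1) (by omega) (by omega) h2
  simpa [show i + 1 + w = i + (w + 1) from by omega, show j + 1 + w = j + (w + 1) from by omega]
    using this

lemma pvDet_mono (cs : List Char) {w w' : Nat} (hle : w ≤ w') (h : pvDet cs w) : pvDet cs w' := by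
  induction w', hle using Nat.le_induction with
  | base => exact h
  | succ n _ ih => exact pvDet_succ cs n ih

lemma pvDet_of_small (cs : List Char) (w : Nat) (h : cs.length - w ≤ 1) : pvDet cs w := by
  intro i j hi hj _
  have : i = j := by omega
  subst this; rfl

-- A's while-loop returns the least deterministic window size ≥ its start
lemma aLoop_spec (cs : List Char) :
    ∀ k w, cs.length - w ≤ k →
      pvDet cs (aLoop cs w) ∧ w ≤ aLoop cs w ∧ ∀ v, w ≤ v → v < aLoop cs w → ¬ pvDet cs v := by
  intro k
  induction k with
  | zero =>
    intro w hk
    have hfalse : ¬ aGo cs w PySem.Dict.empty (List.range (cs.length - w)) = true := by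
      intro h
      have := aGo_range_true_imp cs w _ h
      omega
    rw [aLoop, dif_neg hfalse]
    exact ⟨(aCheck_false_iff cs w).mp (Bool.not_eq_true _ |>.mp hfalse), le_rfl,
      fun v h1 h2 => by omega⟩
  | succ k ih =>
    intro w hk
    by_cases h : aGo cs w PySem.Dict.empty (List.range (cs.length - w)) = true
    · have hw := aGo_range_true_imp cs w _ h
      rw [aLoop, dif_pos h]
      obtain ⟨ih1, ih2, ih3⟩ := ih (w + 1) (by omega)
      refine ⟨ih1, by omega, ?_⟩
      intro v hv1 hv2 hdet
      rcases Nat.eq_or_lt_of_le hv1 with heq | hlt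
      · rw [← aCheck_false_iff] at hdet
        rw [heq] at h
        rw [hdet] at h
        cases h
      · exact ih3 v (by omega) hv2 hdet
    · rw [aLoop, dif_neg h]
      exact ⟨(aCheck_false_iff cs w).mp (Bool.not_eq_true _ |>.mp h), le_rfl,
        fun v h1 h2 => by omega⟩

-- binary search over the monotone predicate finds the least deterministic size
lemma bSearch_eq (cs : List Char) (N : Nat) (hN : pvDet cs N)
    (hmin : ∀ v, 1 ≤ v → v < N → ¬ pvDet cs v) :
    ∀ k lo hi, hi - lo ≤ k → 1 ≤ lo → lo ≤ N → N ≤ hi → bSearch cs lo hi = N := by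
  intro k
  induction k with
  | zero =>
    intro lo hi hk h1 h2 h3
    rw [bSearch, dif_neg (by omega)]
    omega
  | succ k ih =>
    intro lo hi hk h1 h2 h3
    by_cases hlt : lo < hi
    · rw [bSearch, dif_pos hlt]
      simp only
      by_cases hd : bDet cs ((lo + hi) / 2) = true
      · rw [if_pos hd]
        have hdet := (bDet_true_iff cs _).mp hd
        have hNle : N ≤ (lo + hi) / 2 := by
          by_contra hc
          exact hmin _ (by omega) (by omega) hdet
        exact ih lo _ (by omega) h1 h2 hNle
      · rw [if_neg hd]
        have hnd : ¬ pvDet cs ((lo + hi) / 2) := fun hdet => hd ((bDet_true_iff cs _).mpr hdet)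
        have hNgt : (lo + hi) / 2 < N := by
          by_contra hc
          exact hnd (pvDet_mono cs (by omega) hN)
        exact ih _ hi (by omega) (by omega) (by omega) h3
    · rw [bSearch, dif_neg hlt]
      omega

-- the gallop keeps "everything below lo is non-deterministic" and lands on a deterministic hi (or top)
lemma bGallop_spec (cs : List Char) (top : Nat) :
    ∀ k lo hi, top - hi ≤ k → 1 ≤ lo → 1 ≤ hi → hi ≤ top →
      (∀ v, 1 ≤ v → v < lo → ¬ pvDet cs v) →
      (1 ≤ (bGallop cs top lo hi).1 ∧ 1 ≤ (bGallop cs top lo hi).2 ∧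
        (bGallop cs top lo hi).2 ≤ top ∧
        ((bGallop cs top lo hi).2 = top ∨ bDet cs (bGallop cs top lo hi).2 = true) ∧
        (∀ v, 1 ≤ v → v < (bGallop cs top lo hi).1 → ¬ pvDet cs v)) := by
  intro k
  induction k with
  | zero =>
    intro lo hi hk h1 h2 h3 hmin
    have hht : hi = top := by omega
    rw [bGallop, dif_neg (fun hco => absurd hco.1 (by omega))]
    exact ⟨h1, h2, h3, Or.inl hht, hmin⟩
  | succ k ih =>
    intro lo hi hk h1 h2 h3 hmin
    by_cases hcond : hi < top ∧ bDet cs hi = false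
    · rw [bGallop, dif_pos hcond]
      have hnd : ¬ pvDet cs hi := fun hdet => by
        rw [(bDet_true_iff cs hi).mpr hdet] at hcond; exact absurd hcond.2 (by simp)
      have hmin' : ∀ v, 1 ≤ v → v < hi + 1 → ¬ pvDet cs v := by
        intro v hv1 hv2 hdet
        exact hnd (pvDet_mono cs (by omega) hdet)
      have hlt : hi < top := hcond.1
      exact ih (hi + 1) (min (hi * 2 + 1) top) (by omega) (by omega) (by omega) (by omega) hmin'
    · rw [bGallop, dif_neg hcond]
      rcases Bool.eq_false_or_eq_true (bDet cs hi) with hb | hb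
      · exact ⟨h1, h2, h3, Or.inr hb, hmin⟩
      · have hht : hi = top := by
          by_contra hne
          exact hcond ⟨by omega, hb⟩
        exact ⟨h1, h2, h3, Or.inl hht, hmin⟩

-- the two top-level computations agree
lemma main_eq (cs : List Char) :
    bSearch cs (bGallop cs (max 1 (cs.length - 1)) 1 1).1
      (bGallop cs (max 1 (cs.length - 1)) 1 1).2 = aLoop cs 1 := by
  set top := max 1 (cs.length - 1) with htop
  obtain ⟨hNdet, hN1, hNmin⟩ := aLoop_spec cs cs.length 1 (by omega)
  set N := aLoop cs 1 with hNdef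
  have htopdet : pvDet cs top := pvDet_of_small cs top (by omega)
  have hNtop : N ≤ top := by
    by_contra hc
    exact hNmin top (by omega) (by omega) htopdet
  obtain ⟨hp1, hp2, hptop, hpdet, hpmin⟩ :=
    bGallop_spec cs top (top - 1) 1 1 (by omega) le_rfl le_rfl (by omega)
      (fun v hv1 hv2 => by omega)
  have hloN : (bGallop cs top 1 1).1 ≤ N := by
    by_contra hc
    exact hpmin N (by omega) (by omega) hNdet
  have hNhi : N ≤ (bGallop cs top 1 1).2 := by
    rcases hpdet with h | h
    · omega
    · have := (bDet_true_iff cs _).mp h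
      by_contra hc
      exact hNmin _ (by omega) (by omega) this
  exact bSearch_eq cs N hNdet hNmin ((bGallop cs top 1 1).2 - (bGallop cs top 1 1).1) _ _
    (by omega) (by omega) hloN hNhi

-- ===== VERDICT (by name: the statement is the Claim_ definition above) =====
theorem complexity_test_nonlinear_spec : Claim_equal_complexity_test_nonlinear := by
  intro s _
  unfold Spec_complexity_test_nonlinear
  simp only [complexity_test_nonlinear, complexity_test_nonlinear_alt]
  rw [main_eq]
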